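-- pv_equiv track=rewrite | github.com/simpleman383/surveillance-search-optimizer | evaluation/surveillance.py | filter_direct_routes
-- ===== SOURCE A (Python) =====
-- def filter_direct_routes(routes, src, dest, all_nodes):
--   def is_direct(route, src, dest, all_nodes):
--     for point in route:
--       if point in all_nodes and point != src and point != dest:
--         return False
--     return True
--
--   filtered = []
--
--   for route in routes:
--     if is_direct(route, src, dest, all_nodes):
--       filtered.append(route)
--
--   return filtered
-- ===== SOURCE B (Python) =====
-- def filter_direct_routes(routes, src, dest, all_nodes):
--     # Inverted traversal: iterate over surveillance nodes, marking which routes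
--     # pass through any node other than src/dest, then keep the unmarked routes.
--     blocked = [False] * len(routes)
--     for node in all_nodes:
--         if node == src or node == dest:
--             continue
--         for i, route in enumerate(routes):
--             if not blocked[i] and node in route:
--                 blocked[i] = True
--     return [route for route, b in zip(routes, blocked) if not b]
-- ===== Notes on version B (the rewrite author's own statement) =====
-- stated objective: alternative
-- what changed: Inverts the loop nesting: instead of testing each route's points against the node list with an early-return inner loop, B iterates over the surveillance nodes, maintaining a per-route blocked mask that marks routes containing a non-endpoint node, and finally keeps the unmarked routes.
import Mathlib
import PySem

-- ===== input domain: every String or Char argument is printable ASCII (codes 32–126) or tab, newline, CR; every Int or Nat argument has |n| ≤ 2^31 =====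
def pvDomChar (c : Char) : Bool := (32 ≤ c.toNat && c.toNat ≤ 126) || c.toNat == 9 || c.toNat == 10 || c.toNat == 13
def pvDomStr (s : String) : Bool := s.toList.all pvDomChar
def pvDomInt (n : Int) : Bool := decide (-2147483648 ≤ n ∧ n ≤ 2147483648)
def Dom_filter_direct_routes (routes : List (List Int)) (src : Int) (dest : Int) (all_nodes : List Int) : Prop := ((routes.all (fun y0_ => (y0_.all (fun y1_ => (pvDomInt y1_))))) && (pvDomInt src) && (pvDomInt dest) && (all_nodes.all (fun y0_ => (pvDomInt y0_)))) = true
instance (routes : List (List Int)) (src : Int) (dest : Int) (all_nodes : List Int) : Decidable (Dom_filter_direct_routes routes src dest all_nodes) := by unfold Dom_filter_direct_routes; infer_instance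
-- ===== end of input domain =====

-- ===== PORT A =====
-- B inverts the loop nesting (nodes outer, routes inner, a blocked mask) instead of a per-route early-return point scan (objective: alternative).
-- inner helper `is_direct`: early-return loop over the route's points
def pvIsDirect : List Int → Int → Int → List Int → Bool
  | [], _, _, _ => true
  | point :: rest, src, dest, all_nodes =>
      if all_nodes.contains point && point != src && point != dest then false
      else pvIsDirect rest src dest all_nodes

def filter_direct_routes (routes : List (List Int)) (src : Int) (dest : Int) (all_nodes : List Int) : List (List Int) :=
  routes.foldl (fun filtered route =>
    if pvIsDirect route src dest all_nodes then filtered ++ [route] else filtered) []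

-- ===== PORT B =====
-- inner loop: `for i, route in enumerate(routes): if not blocked[i] and node in route: blocked[i] = True`
def pvMarkNode (node : Int) (routes : List (List Int)) (blocked : List Bool) : List Bool :=
  (routes.zip blocked).map (fun rb => if !rb.2 && rb.1.contains node then true else rb.2)

def filter_direct_routes_alt (routes : List (List Int)) (src : Int) (dest : Int) (all_nodes : List Int) : List (List Int) :=
  let blocked := all_nodes.foldl
    (fun bl node => if node == src || node == dest then bl else pvMarkNode node routes bl)
    (routes.map (fun _ => false))
  ((routes.zip blocked).filter (fun rb => !rb.2)).map Prod.fst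

-- ===== PRECONDITION & SPEC =====
def Spec_filter_direct_routes (routes : List (List Int)) (src : Int) (dest : Int) (all_nodes : List Int) (out : List (List Int)) : Prop := out = filter_direct_routes_alt routes src dest all_nodes
instance (routes : List (List Int)) (src : Int) (dest : Int) (all_nodes : List Int) (out : List (List Int)) : Decidable (Spec_filter_direct_routes routes src dest all_nodes out) := by unfold Spec_filter_direct_routes; infer_instance

-- ===== CLAIM =====
def Claim_equal_filter_direct_routes : Prop := ∀ (routes : List (List Int)) (src : Int) (dest : Int) (all_nodes : List Int), Dom_filter_direct_routes routes src dest all_nodes → Spec_filter_direct_routes routes src dest all_nodes (filter_direct_routes routes src dest all_nodes)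

-- ===== LEMMAS AND PROOFS =====

lemma pvMarkNode_map (node : Int) (routes : List (List Int)) (g : List Int → Bool) :
    pvMarkNode node routes (routes.map g) =
      routes.map (fun r => if !g r && r.contains node then true else g r) := by
  induction routes with
  | nil => rfl
  | cons r rs ih => simp [pvMarkNode, List.zip] at ih ⊢; exact ih

lemma foldl_mark (src dest : Int) (routes : List (List Int)) :
    ∀ (ns : List Int) (g : List Int → Bool),
    ns.foldl (fun bl node => if node == src || node == dest then bl else pvMarkNode node routes bl)
        (routes.map g) =
      routes.map (fun r => g r || ns.any (fun n => !(n == src || n == dest) && r.contains n)) := by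
  intro ns
  induction ns with
  | nil => intro g; simp
  | cons n ns ih =>
    intro g
    simp only [List.foldl_cons]
    by_cases h : (n == src || n == dest) = true
    · rw [if_pos h, ih]
      refine congrFun (congrArg List.map (funext fun r => ?_)) routes
      rcases (Bool.or_eq_true _ _).mp h with h1 | h1 <;> simp [h1]
    · rw [if_neg h, pvMarkNode_map, ih]
      refine congrFun (congrArg List.map (funext fun r => ?_)) routes
      simp only [List.any_cons]
      cases hg : g r <;> cases hc : r.contains n <;> simp [h]

lemma zip_filter_map (routes : List (List Int)) (h : List Int → Bool) :
    ((routes.zip (routes.map h)).filter (fun rb => !rb.2)).map Prod.fst =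
      routes.filter (fun r => !h r) := by
  induction routes with
  | nil => rfl
  | cons r rs ih =>
    simp only [List.map_cons, List.zip_cons_cons, List.filter_cons]
    cases hr : h r <;> simp [ih]

lemma pvIsDirect_iff (route : List Int) (src dest : Int) (all_nodes : List Int) :
    pvIsDirect route src dest all_nodes = true ↔
      ∀ p ∈ route, p ∈ all_nodes → p = src ∨ p = dest := by
  induction route with
  | nil => simp [pvIsDirect]
  | cons p rest ih =>
    simp only [pvIsDirect]
    by_cases h : (all_nodes.contains p && p != src && p != dest) = true
    · rw [if_pos h]
      simp only [List.contains_eq_mem, Bool.and_eq_true, bne_iff_ne, decide_eq_true_eq] at h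
      constructor
      · intro hf; cases hf
      · intro hall
        rcases hall p (by simp) h.1.1 with h1 | h1 <;> [exact absurd h1 h.1.2; exact absurd h1 h.2]
    · rw [if_neg h, ih]
      simp only [List.contains_eq_mem, Bool.and_eq_true, bne_iff_ne, decide_eq_true_eq,
        not_and, not_not] at h
      constructor
      · intro hall q hq hqn
        rcases List.mem_cons.mp hq with rfl | hq'
        · by_cases hs : q = src
          · exact Or.inl hs
          · exact Or.inr (h ⟨hqn, hs⟩)
        · exact hall q hq' hqn
      · intro hall q hq hqn; exact hall q (List.mem_cons_of_mem _ hq) hqn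

lemma pvIsDirect_eq (src dest : Int) (all_nodes : List Int) (r : List Int) :
    pvIsDirect r src dest all_nodes =
      !(all_nodes.any (fun n => !(n == src || n == dest) && r.contains n)) := by
  rw [Bool.eq_iff_iff, pvIsDirect_iff]
  simp only [Bool.not_eq_true', List.any_eq_false]
  constructor
  · intro h n hn
    by_cases hm : n ∈ r
    · rcases h n hm hn with rfl | rfl <;> simp
    · simp [hm]
  · intro h p hp hpn
    rcases Decidable.em (p = src) with hs | hs
    · exact Or.inl hs
    · exact Or.inr (by simpa [hp, hs] using h p hpn)

-- ===== VERDICT =====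
theorem filter_direct_routes_spec : Claim_equal_filter_direct_routes := by
  intro routes src dest all_nodes _
  unfold Spec_filter_direct_routes filter_direct_routes filter_direct_routes_alt
  rw [PySem.List.foldl_append_if]
  simp only [List.nil_append, List.map_id']
  rw [foldl_mark, zip_filter_map]
  exact List.filter_congr (fun r _ => by rw [pvIsDirect_eq]; simp)
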